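-- pv_equiv track=rewrite | github.com/mZasir/BUT-INFO-PROJET | SEMESTRE 1/SAE 1.02 - Comparaison d'approche algorithmique/santa_claus.py | better_inversion
-- ===== SOURCE A (Python) =====
-- def distance_cities(name1, name2, d_cities):
--     """
--     Paramètre(s) :
--     - name1 : un premier nom de ville
--     - name2 : un second nom de ville
--     - d_cities : un dictionnaire de distances
--     La fonction renvoie la distance entre les deux villes passées en paramètres si elles sont dans le dictionnaire,
--     -1 sinon.
--     """
--     if name1 not in d_cities or name2 not in d_cities[name1]: #on vérifie que les villes sont dans le dictionnaire
--         return -1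
--     dist = d_cities[name1][name2]
--     return dist
--
-- def tour_length(tour, d_cities):
--     """
--     Paramètre(s) :
--     - tour : un tableau contenant l'ordre des villes à parcourir
--     - d_cities : un dictionnaire de distances
--     La fonction renvoie la longueur du tour passé en paramètres.
--     """
--     dist = 0
--     v_depart = tour[0]
--     for i in range(len(tour)-1):
--         ville1 = tour[i]
--         ville2 = tour[i+1]
--         dist += distance_cities(ville1,ville2,d_cities)
--     dist += distance_cities(ville2,v_depart,d_cities)
--     return dist
--
-- def reverse_part_tour(tour, ind_b, ind_e):
--     """
--     Paramètre(s) :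
--     - tour : un tableau de noms de villes
--     - ind_b et ind_e : deux indices
--     La fonction inverse la partie du tableau tour contenue entre les deux indices inclus.
--     """
--     if ind_b < 0 or ind_e >= len(tour) or ind_b >= ind_e:
--         return tour
--
--     tour_copy = tour.copy()
--     tour_copy[ind_b:ind_e + 1] = reversed(tour_copy[ind_b:ind_e+1])
--     return tour_copy
--
-- def better_inversion(tour, d_cities):
--     """
--     Paramètre(s) :
--     - tour : un tableau noms de villes
--     - d_cities : un dictionnaire de distances
--     La fonction renvoie True si une inversion du tour a été faite et False sinon.
--     """
--     min_dist = tour_length(tour,d_cities)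
--     tour1 = tour.copy()
--
--     for i in range(len(tour)):
--         for j in range(i+1,len(tour)):
--             tourTemp = reverse_part_tour(tour1, i, j)
--             dist_tour_temp = tour_length(tourTemp,d_cities)
--
--             if dist_tour_temp < min_dist:
--                 min_dist = dist_tour_temp
--                 tour[:] = tourTemp
--                 return True
--
--     return False
-- ===== SOURCE B (Python) =====
-- def better_inversion(tour, d_cities):
--     # O(n^2): per-pair reversal length from cyclic edge arrays and running
--     # segment sums instead of rebuilding and re-measuring each tour (O(n^3)).
--     n = len(tour)
--
--     def dist(a, b):
--         row = d_cities.get(a)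
--         if row is None:
--             return -1
--         return row.get(b, -1)
--
--     w = [dist(tour[k], tour[(k + 1) % n]) for k in range(n)]   # forward cyclic edges
--     r = [dist(tour[(k + 1) % n], tour[k]) for k in range(n)]   # backward cyclic edges
--     base = sum(w)
--     rev_total = sum(r)
--
--     for i in range(n):
--         fwd = 0  # sum of w[i..j-1]
--         bwd = 0  # sum of r[i..j-1]
--         for j in range(i + 1, n):
--             fwd += w[j - 1]
--             bwd += r[j - 1]
--             if i == 0 and j == n - 1:
--                 new_len = rev_total
--             else:
--                 new_len = (base
--                            - (w[(i - 1) % n] + fwd + w[j])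
--                            + dist(tour[(i - 1) % n], tour[j])
--                            + bwd
--                            + dist(tour[i], tour[(j + 1) % n]))
--             if new_len < base:
--                 tour[i:j + 1] = reversed(tour[i:j + 1])
--                 return True
--     return False
-- ===== Notes on version B (the rewrite author's own statement) =====
-- stated objective: faster
-- what changed: Instead of rebuilding each candidate tour and re-measuring its full length (O(n) per pair, O(n^3) total), B precomputes the cyclic forward/backward edge-cost arrays once and prices each segment reversal in O(1) from running segment sums, scanning pairs in the same order and performing the same in-place update of tour on the first improvement.
import Mathlib
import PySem

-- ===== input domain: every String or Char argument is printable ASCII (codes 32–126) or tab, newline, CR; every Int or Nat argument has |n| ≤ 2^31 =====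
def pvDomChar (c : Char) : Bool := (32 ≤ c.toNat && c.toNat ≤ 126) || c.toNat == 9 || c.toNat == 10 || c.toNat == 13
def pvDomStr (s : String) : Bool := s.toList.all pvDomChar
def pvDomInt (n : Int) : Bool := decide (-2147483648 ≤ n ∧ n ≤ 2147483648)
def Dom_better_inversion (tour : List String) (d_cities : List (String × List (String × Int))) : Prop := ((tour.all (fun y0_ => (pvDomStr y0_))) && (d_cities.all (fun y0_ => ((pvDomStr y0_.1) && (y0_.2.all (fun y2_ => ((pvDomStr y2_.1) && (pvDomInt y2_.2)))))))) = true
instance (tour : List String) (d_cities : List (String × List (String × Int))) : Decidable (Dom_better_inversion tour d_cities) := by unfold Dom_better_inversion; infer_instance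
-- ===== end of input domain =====

-- B replaces A's O(n^3) rebuild-and-remeasure 2-opt scan by an O(n^2) scan pricing each
-- reversal from precomputed cyclic edge arrays and running segment sums; the equivalence
-- proved is about the RETURN value (both Pythons also mutate `tour` identically in place).

-- ===== PORT A =====
def distance_cities (name1 name2 : String) (d_cities : List (String × List (String × Int))) : Int :=
  match (PySem.Dict.mk d_cities).get? name1 with
  | none => -1
  | some inner =>
    match (PySem.Dict.mk inner).get? name2 with
    | none => -1
    | some dist => dist

def tour_length (tour : List String) (d_cities : List (String × List (String × Int))) : Int :=
  let v_depart := PySem.List.pyGetD tour 0 ""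
  let st := (PySem.List.pyRange 0 ((tour.length : Int) - 1) 1).foldl
    (fun (st : Int × String) i =>
      let ville1 := PySem.List.pyGetD tour i ""
      let ville2 := PySem.List.pyGetD tour (i + 1) ""
      (st.1 + distance_cities ville1 ville2 d_cities, ville2))
    (0, "")
  st.1 + distance_cities st.2 v_depart d_cities

def reverse_part_tour (tour : List String) (ind_b ind_e : Int) : List String :=
  if ind_b < 0 ∨ (tour.length : Int) ≤ ind_e ∨ ind_e ≤ ind_b then tour
  else
    PySem.List.slice tour none (some ind_b) ++
    (PySem.List.slice tour (some ind_b) (some (ind_e + 1))).reverse ++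
    PySem.List.slice tour (some (ind_e + 1)) none

def better_inversion (tour : List String) (d_cities : List (String × List (String × Int))) : Bool :=
  let min_dist := tour_length tour d_cities
  let tour1 := tour
  (PySem.List.pyRange 0 (tour.length : Int) 1).any fun i =>
    (PySem.List.pyRange (i + 1) (tour.length : Int) 1).any fun j =>
      tour_length (reverse_part_tour tour1 i j) d_cities < min_dist

-- ===== PORT B =====
def bDist (a b : String) (d_cities : List (String × List (String × Int))) : Int :=
  match (PySem.Dict.mk d_cities).get? a with
  | none => -1
  | some row => ((PySem.Dict.mk row).get? b).getD (-1)

def bScan (tour : List String) (d_cities : List (String × List (String × Int)))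
    (w r : List Int) (base rev_total n i : Int) :
    List Int → Int → Int → Bool
  | [], _, _ => false
  | j :: js, fwd, bwd =>
    let fwd' := fwd + PySem.List.pyGetD w (j - 1) 0
    let bwd' := bwd + PySem.List.pyGetD r (j - 1) 0
    let new_len :=
      if i = 0 ∧ j = n - 1 then rev_total
      else
        base - (PySem.List.pyGetD w (PySem.Int.mod (i - 1) n) 0 + fwd' + PySem.List.pyGetD w j 0)
          + bDist (PySem.List.pyGetD tour (PySem.Int.mod (i - 1) n) "") (PySem.List.pyGetD tour j "") d_cities
          + bwd'
          + bDist (PySem.List.pyGetD tour i "") (PySem.List.pyGetD tour (PySem.Int.mod (j + 1) n) "") d_cities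
    if new_len < base then true
    else bScan tour d_cities w r base rev_total n i js fwd' bwd'

def better_inversion_alt (tour : List String) (d_cities : List (String × List (String × Int))) : Bool :=
  let n : Int := tour.length
  let w := (PySem.List.pyRange 0 n 1).map fun k =>
    bDist (PySem.List.pyGetD tour k "") (PySem.List.pyGetD tour (PySem.Int.mod (k + 1) n) "") d_cities
  let r := (PySem.List.pyRange 0 n 1).map fun k =>
    bDist (PySem.List.pyGetD tour (PySem.Int.mod (k + 1) n) "") (PySem.List.pyGetD tour k "") d_cities
  let base := w.sum
  let rev_total := r.sum
  (PySem.List.pyRange 0 n 1).any fun i =>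
    bScan tour d_cities w r base rev_total n i (PySem.List.pyRange (i + 1) n 1) 0 0

-- ===== PRECONDITION & SPEC =====
-- Pre_ excludes only tours of fewer than two cities, on which Python A raises
-- (IndexError on [], UnboundLocalError on a singleton) before returning anything.
def Pre_better_inversion (tour : List String) (d_cities : List (String × List (String × Int))) : Prop :=
  2 ≤ tour.length
instance (tour : List String) (d_cities : List (String × List (String × Int))) : Decidable (Pre_better_inversion tour d_cities) := by unfold Pre_better_inversion; infer_instance

def pvWitness_better_inversion : List String × (List (String × List (String × Int))) :=
  (["a", "b"], [("a", [("b", 3)]), ("b", [("a", 4)])])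

def Spec_better_inversion (tour : List String) (d_cities : List (String × List (String × Int))) (out : Bool) : Prop := out = better_inversion_alt tour d_cities
instance (tour : List String) (d_cities : List (String × List (String × Int))) (out : Bool) : Decidable (Spec_better_inversion tour d_cities out) := by unfold Spec_better_inversion; infer_instance

-- ===== CLAIM (what is proved, stated in full; the proofs are below) =====
def Claim_equal_better_inversion : Prop := ∀ (tour : List String) (d_cities : List (String × List (String × Int))), Dom_better_inversion tour d_cities → Pre_better_inversion tour d_cities → Spec_better_inversion tour d_cities (better_inversion tour d_cities)

-- ===== LEMMAS AND PROOFS =====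

def pLen (g : String → String → Int) : List String → Int
  | [] => 0
  | [_] => 0
  | x :: y :: l => g x y + pLen g (y :: l)
theorem pLen_cons (g : String → String → Int) (x : String) (l : List String) (h : l ≠ []) :
    pLen g (x :: l) = g x (l.headD "") + pLen g l := by
  cases l with
  | nil => exact absurd rfl h
  | cons y t => rfl
theorem pLen_append (g : String → String → Int) (xs ys : List String)
    (hx : xs ≠ []) (hy : ys ≠ []) :
    pLen g (xs ++ ys) = pLen g xs + g (xs.getLastD "") (ys.headD "") + pLen g ys := by
  induction xs with
  | nil => exact absurd rfl hx
  | cons x t ih =>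
    cases t with
    | nil =>
      cases ys with
      | nil => exact absurd rfl hy
      | cons y ys' => simp [pLen]
    | cons x2 t2 =>
      have h2 := ih (by simp)
      simp only [List.cons_append, pLen] at *
      rw [h2]
      simp
      ring
theorem pLen_reverse (g : String → String → Int) (xs : List String) :
    pLen g xs.reverse = pLen (fun a b => g b a) xs := by
  induction xs with
  | nil => rfl
  | cons x t ih =>
    cases t with
    | nil => rfl
    | cons y u =>
      rw [List.reverse_cons, pLen_append g _ [x] (by simp) (by simp), ih]
      have hh : ((y :: u).reverse).getLastD "" = y := by
        simp [List.getLastD_eq_getLast?, List.getLast?_reverse]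
      rw [hh]
      simp [pLen]
      ring
theorem pLen_take_succ (g : String → String → Int) (xs : List String) (k : Nat)
    (h : k + 1 < xs.length) :
    pLen g (xs.take (k + 2)) = pLen g (xs.take (k + 1)) + g (xs.getD k "") (xs.getD (k + 1) "") := by
  induction xs generalizing k with
  | nil => simp at h
  | cons x t ih =>
    cases k with
    | zero =>
      cases t with
      | nil => simp at h
      | cons y u => simp [pLen]
    | succ k' =>
      have ht : k' + 1 < t.length := by simp at h; omega
      have h2 : t ≠ [] := by cases t <;> simp_all
      have hne : ∀ m : Nat, t.take (m + 1) ≠ [] := by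
        intro m; cases t <;> simp_all
      simp only [List.take_succ_cons, List.getD_cons_succ]
      rw [pLen_cons g x _ (hne _), pLen_cons g x _ (hne _), ih k' ht]
      have hhead : ∀ m : Nat, (t.take (m + 1)).headD "" = t.headD "" := by
        intro m; cases t <;> simp_all
      rw [hhead, hhead]
      ring
theorem sum_range_pLen (g : String → String → Int) (ys : List String) (m : Nat)
    (hm : m < ys.length) :
    (((List.range m).map (fun t => g (ys.getD t "") (ys.getD (t + 1) ""))).sum)
      = pLen g (ys.take (m + 1)) := by
  induction m with
  | zero =>
    cases ys with
    | nil => simp at hm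
    | cons y u => simp [pLen]
  | succ m' ih =>
    rw [List.range_succ]
    simp only [List.map_append, List.sum_append, List.map_cons, List.map_nil, List.sum_cons,
      List.sum_nil]
    rw [ih (by omega), pLen_take_succ g ys m' hm]
    ring

def cdist (d_cities : List (String × List (String × Int))) (a b : String) : Int :=
  distance_cities a b d_cities

theorem bDist_cdist (a b : String) (d : List (String × List (String × Int))) :
    bDist a b d = cdist d a b := by
  cases hd : (PySem.Dict.mk d).get? a with
  | none => simp [bDist, cdist, distance_cities, hd]
  | some row =>
    cases hb : (PySem.Dict.mk row).get? b with
    | none => simp [bDist, cdist, distance_cities, hd, hb]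
    | some v => simp [bDist, cdist, distance_cities, hd, hb]

theorem tl_fold (xs : List String) (d : List (String × List (String × Int))) (k : Nat)
    (h1 : 1 ≤ k) (h2 : k < xs.length) :
    (PySem.List.pyRange 0 (k : Int) 1).foldl
      (fun (st : Int × String) i =>
        (st.1 + distance_cities (PySem.List.pyGetD xs i "") (PySem.List.pyGetD xs (i + 1) "") d,
          PySem.List.pyGetD xs (i + 1) ""))
      (0, "")
      = (pLen (cdist d) (xs.take (k + 1)), xs.getD k "") := by
  induction k with
  | zero => omega
  | succ k' ih =>
    rcases Nat.eq_or_lt_of_le h1 with h0 | h0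
    · -- k'+1 = 1, k' = 0
      have hk0 : k' = 0 := by omega
      subst hk0
      have h1lt : 1 < xs.length := h2
      have htake : xs.take 2 = [xs.getD 0 "", xs.getD 1 ""] := by
        match xs, h1lt with
        | x :: y :: t, _ => simp
      have hr : PySem.List.pyRange 0 ((1 : Nat) : Int) 1 = [0] := by decide
      rw [hr]
      simp only [List.foldl_cons, List.foldl_nil]
      rw [htake]
      have g0 : PySem.List.pyGetD xs (0 : Int) "" = xs.getD 0 "" := by
        simpa using PySem.List.pyGetD_natCast xs 0 ""
      have g1 : PySem.List.pyGetD xs ((0 : Int) + 1) "" = xs.getD 1 "" := by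
        simpa using PySem.List.pyGetD_natCast xs 1 ""
      rw [g0, g1]
      simp [pLen, cdist]
    · -- k' ≥ 1
      have ihh := ih (by omega) (by omega)
      have hsplit : PySem.List.pyRange 0 (((k' + 1 : Nat)) : Int) 1
          = PySem.List.pyRange 0 (k' : Int) 1 ++ [(k' : Int)] := by
        push_cast
        exact PySem.List.pyRange_one_succ_right (by exact_mod_cast Nat.zero_le k')
      rw [hsplit, List.foldl_append, ihh]
      simp only [List.foldl_cons, List.foldl_nil]
      have gk : PySem.List.pyGetD xs ((k' : Nat) : Int) "" = xs.getD k' "" := by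
        simpa using PySem.List.pyGetD_natCast xs k' ""
      have gk1 : PySem.List.pyGetD xs (((k' : Nat) : Int) + 1) "" = xs.getD (k' + 1) "" := by
        have : ((k' : Nat) : Int) + 1 = (((k' + 1 : Nat)) : Int) := by push_cast; ring
        rw [this]
        simpa using PySem.List.pyGetD_natCast xs (k' + 1) ""
      rw [gk, gk1, pLen_take_succ (cdist d) xs k' (by omega)]
      simp [cdist]
theorem tour_length_eq (xs : List String) (d : List (String × List (String × Int)))
    (h : 2 ≤ xs.length) :
    tour_length xs d
      = pLen (cdist d) xs + cdist d (xs.getD (xs.length - 1) "") (xs.getD 0 "") := by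
  have hcast : ((xs.length : Int) - 1) = (((xs.length - 1 : Nat)) : Int) := by
    have : 1 ≤ xs.length := by omega
    push_cast [this]
    ring
  simp only [tour_length]
  rw [hcast, tl_fold xs d (xs.length - 1) (by omega) (by omega)]
  have : xs.length - 1 + 1 = xs.length := by omega
  rw [this, List.take_length]
  have g0 : PySem.List.pyGetD xs (0 : Int) "" = xs.getD 0 "" := by
    simpa using PySem.List.pyGetD_natCast xs 0 ""
  rw [g0]
  simp [cdist]


-- the edge arrays of B, as closed terms
def wArr (xs : List String) (d : List (String × List (String × Int))) : List Int :=
  (PySem.List.pyRange 0 (xs.length : Int) 1).map fun k =>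
    bDist (PySem.List.pyGetD xs k "") (PySem.List.pyGetD xs (PySem.Int.mod (k + 1) (xs.length : Int)) "") d

def rArr (xs : List String) (d : List (String × List (String × Int))) : List Int :=
  (PySem.List.pyRange 0 (xs.length : Int) 1).map fun k =>
    bDist (PySem.List.pyGetD xs (PySem.Int.mod (k + 1) (xs.length : Int)) "") (PySem.List.pyGetD xs k "") d

-- the per-pair reversal length B computes at pair (i, j)
def nlVal (xs : List String) (d : List (String × List (String × Int))) (i j : Int) : Int :=
  if i = 0 ∧ j = (xs.length : Int) - 1 then (rArr xs d).sum
  else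
    (wArr xs d).sum
      - (PySem.List.pyGetD (wArr xs d) (PySem.Int.mod (i - 1) (xs.length : Int)) 0
          + ((PySem.List.pyRange i j 1).map (fun k => PySem.List.pyGetD (wArr xs d) k 0)).sum
          + PySem.List.pyGetD (wArr xs d) j 0)
      + bDist (PySem.List.pyGetD xs (PySem.Int.mod (i - 1) (xs.length : Int)) "") (PySem.List.pyGetD xs j "") d
      + ((PySem.List.pyRange i j 1).map (fun k => PySem.List.pyGetD (rArr xs d) k 0)).sum
      + bDist (PySem.List.pyGetD xs i "") (PySem.List.pyGetD xs (PySem.Int.mod (j + 1) (xs.length : Int)) "") d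

theorem getD_drop (xs : List String) (i t : Nat) :
    (xs.drop i).getD t "" = xs.getD (i + t) "" := by
  simp [List.getD_eq_getElem?_getD, List.getElem?_drop]

theorem wArr_get (xs : List String) (d : List (String × List (String × Int))) (k : Nat)
    (hk : k < xs.length) :
    PySem.List.pyGetD (wArr xs d) (k : Int) 0
      = cdist d (xs.getD k "") (xs.getD ((k + 1) % xs.length) "") := by
  unfold wArr
  rw [PySem.List.pyGetD_map_pyRange _ xs.length k 0 hk]
  have h1 : ((k : Int) + 1) = ((k + 1 : Nat) : Int) := by push_cast; ring
  have h2 : PySem.Int.mod ((k : Int) + 1) ((xs.length : Int))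
      = (((k + 1) % xs.length : Nat) : Int) := by
    rw [h1, PySem.Int.mod_natCast]
  rw [h2]
  simp only [PySem.List.pyGetD_natCast]
  exact bDist_cdist _ _ _

theorem rArr_get (xs : List String) (d : List (String × List (String × Int))) (k : Nat)
    (hk : k < xs.length) :
    PySem.List.pyGetD (rArr xs d) (k : Int) 0
      = cdist d (xs.getD ((k + 1) % xs.length) "") (xs.getD k "") := by
  unfold rArr
  rw [PySem.List.pyGetD_map_pyRange _ xs.length k 0 hk]
  have h1 : ((k : Int) + 1) = ((k + 1 : Nat) : Int) := by push_cast; ring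
  have h2 : PySem.Int.mod ((k : Int) + 1) ((xs.length : Int))
      = (((k + 1) % xs.length : Nat) : Int) := by
    rw [h1, PySem.Int.mod_natCast]
  rw [h2]
  simp only [PySem.List.pyGetD_natCast]
  exact bDist_cdist _ _ _

theorem wArr_seg (xs : List String) (d : List (String × List (String × Int))) (i j : Nat)
    (hij : i ≤ j) (hj : j < xs.length) :
    ((PySem.List.pyRange (i : Int) (j : Int) 1).map (fun k => PySem.List.pyGetD (wArr xs d) k 0)).sum
      = pLen (cdist d) ((xs.drop i).take (j - i + 1)) := by
  rw [PySem.List.pyRange_one]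
  have hc : ((j : Int) - (i : Int)).toNat = j - i := by omega
  rw [hc, List.map_map]
  rw [List.map_congr_left (g := fun t => cdist d ((xs.drop i).getD t "") ((xs.drop i).getD (t + 1) ""))
    (by
      intro t ht
      simp only [List.mem_range] at ht
      simp only [Function.comp_apply]
      have h1 : ((i : Int) + (t : Nat)) = ((i + t : Nat) : Int) := by push_cast; ring
      rw [h1, wArr_get xs d (i + t) (by omega)]
      have hm : (i + t + 1) % xs.length = i + t + 1 := Nat.mod_eq_of_lt (by omega)
      rw [hm, getD_drop, getD_drop]
      have : i + (t + 1) = i + t + 1 := by omega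
      rw [this])]
  rw [sum_range_pLen (cdist d) (xs.drop i) (j - i) (by rw [List.length_drop]; omega)]

theorem rArr_seg (xs : List String) (d : List (String × List (String × Int))) (i j : Nat)
    (hij : i ≤ j) (hj : j < xs.length) :
    ((PySem.List.pyRange (i : Int) (j : Int) 1).map (fun k => PySem.List.pyGetD (rArr xs d) k 0)).sum
      = pLen (cdist d) (((xs.drop i).take (j - i + 1)).reverse) := by
  rw [PySem.List.pyRange_one]
  have hc : ((j : Int) - (i : Int)).toNat = j - i := by omega
  rw [hc, List.map_map]
  rw [List.map_congr_left (g := fun t => (fun a b => cdist d b a) ((xs.drop i).getD t "") ((xs.drop i).getD (t + 1) ""))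
    (by
      intro t ht
      simp only [List.mem_range] at ht
      simp only [Function.comp_apply]
      have h1 : ((i : Int) + (t : Nat)) = ((i + t : Nat) : Int) := by push_cast; ring
      rw [h1, rArr_get xs d (i + t) (by omega)]
      have hm : (i + t + 1) % xs.length = i + t + 1 := Nat.mod_eq_of_lt (by omega)
      rw [hm, getD_drop, getD_drop]
      have : i + (t + 1) = i + t + 1 := by omega
      rw [this])]
  rw [sum_range_pLen (fun a b => cdist d b a) (xs.drop i) (j - i) (by rw [List.length_drop]; omega)]
  rw [pLen_reverse]

theorem wArr_sum (xs : List String) (d : List (String × List (String × Int)))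
    (h : 2 ≤ xs.length) :
    (wArr xs d).sum = tour_length xs d := by
  unfold wArr
  rw [PySem.List.pyRange_one]
  have hc : ((xs.length : Int) - 0).toNat = xs.length := by omega
  rw [hc, List.map_map]
  rw [List.map_congr_left (g := fun t => cdist d (xs.getD t "") (xs.getD ((t + 1) % xs.length) ""))
    (by
      intro t ht
      simp only [List.mem_range] at ht
      simp only [Function.comp_apply]
      have h1 : ((0 : Int) + (t : Nat)) = ((t : Nat) : Int) := by push_cast; ring
      have h2 : PySem.Int.mod (((t : Nat) : Int) + 1) ((xs.length : Int))
          = (((t + 1) % xs.length : Nat) : Int) := by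
        have : ((t : Int) + 1) = ((t + 1 : Nat) : Int) := by push_cast; ring
        rw [this, PySem.Int.mod_natCast]
      rw [h1, h2]
      simp only [PySem.List.pyGetD_natCast]
      exact bDist_cdist _ _ _)]
  rw [show List.range xs.length = List.range ((xs.length - 1) + 1) from by
    congr 1; omega, List.range_succ]
  simp only [List.map_append, List.sum_append, List.map_cons, List.map_nil, List.sum_cons, List.sum_nil]
  rw [List.map_congr_left (g := fun t => cdist d (xs.getD t "") (xs.getD (t + 1) ""))
    (by
      intro t ht
      simp only [List.mem_range] at ht
      have : (t + 1) % xs.length = t + 1 := Nat.mod_eq_of_lt (by omega)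
      rw [this])]
  rw [sum_range_pLen (cdist d) xs (xs.length - 1) (by omega)]
  have h3 : xs.length - 1 + 1 = xs.length := by omega
  rw [h3, List.take_length]
  have h4 : xs.length % xs.length = 0 := Nat.mod_self _
  rw [h4, tour_length_eq xs d h]
  ring

theorem rArr_sum (xs : List String) (d : List (String × List (String × Int)))
    (h : 2 ≤ xs.length) :
    (rArr xs d).sum = tour_length xs.reverse d := by
  unfold rArr
  rw [PySem.List.pyRange_one]
  have hc : ((xs.length : Int) - 0).toNat = xs.length := by omega
  rw [hc, List.map_map]
  rw [List.map_congr_left (g := fun t => cdist d (xs.getD ((t + 1) % xs.length) "") (xs.getD t ""))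
    (by
      intro t ht
      simp only [List.mem_range] at ht
      simp only [Function.comp_apply]
      have h1 : ((0 : Int) + (t : Nat)) = ((t : Nat) : Int) := by push_cast; ring
      have h2 : PySem.Int.mod (((t : Nat) : Int) + 1) ((xs.length : Int))
          = (((t + 1) % xs.length : Nat) : Int) := by
        have : ((t : Int) + 1) = ((t + 1 : Nat) : Int) := by push_cast; ring
        rw [this, PySem.Int.mod_natCast]
      rw [h1, h2]
      simp only [PySem.List.pyGetD_natCast]
      exact bDist_cdist _ _ _)]
  rw [show List.range xs.length = List.range ((xs.length - 1) + 1) from by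
    congr 1; omega, List.range_succ]
  simp only [List.map_append, List.sum_append, List.map_cons, List.map_nil, List.sum_cons, List.sum_nil]
  rw [List.map_congr_left (g := fun t => (fun a b => cdist d b a) (xs.getD t "") (xs.getD (t + 1) ""))
    (by
      intro t ht
      simp only [List.mem_range] at ht
      have : (t + 1) % xs.length = t + 1 := Nat.mod_eq_of_lt (by omega)
      rw [this])]
  rw [sum_range_pLen (fun a b => cdist d b a) xs (xs.length - 1) (by omega)]
  have h3 : xs.length - 1 + 1 = xs.length := by omega
  rw [h3, List.take_length]
  have h4 : xs.length % xs.length = 0 := Nat.mod_self _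
  rw [h4, tour_length_eq xs.reverse d (by simpa using h), ← pLen_reverse]
  have hg0 : xs.reverse.getD 0 "" = xs.getD (xs.length - 1) "" := by
    rw [List.getD_eq_getElem?_getD, List.getD_eq_getElem?_getD,
      List.getElem?_reverse (by omega)]
    have he : xs.length - 1 - 0 = xs.length - 1 := by omega
    rw [he]
  have hg1 : xs.reverse.getD (xs.reverse.length - 1) "" = xs.getD 0 "" := by
    rw [List.getD_eq_getElem?_getD, List.getD_eq_getElem?_getD,
      List.getElem?_reverse (by simp only [List.length_reverse]; omega)]
    have he : xs.length - 1 - (xs.reverse.length - 1) = 0 := by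
      simp only [List.length_reverse]; omega
    rw [he]
  rw [hg0, hg1]
  ring

theorem rpt_eq (xs : List String) (i j : Nat) (hij : i < j) (hj : j < xs.length) :
    reverse_part_tour xs (i : Int) (j : Int)
      = xs.take i ++ ((xs.drop i).take (j - i + 1)).reverse ++ xs.drop (j + 1) := by
  unfold reverse_part_tour
  rw [if_neg (by push_cast; omega)]
  have hj1 : ((j : Nat) : Int) + 1 = ((j + 1 : Nat) : Int) := by push_cast; ring
  rw [hj1, PySem.List.slice_to_natCast, PySem.List.slice_natCast, PySem.List.slice_from_natCast]
  have : j + 1 - i = j - i + 1 := by omega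
  rw [this]

theorem headD_eq_getD (l : List String) : l.headD "" = l.getD 0 "" := by
  cases l <;> rfl

theorem getLastD_irrel (l : List String) (h : l ≠ []) (a b : String) :
    l.getLastD a = l.getLastD b := by
  cases l with
  | nil => exact absurd rfl h
  | cons y u => rfl

theorem getLastD_eq_getD (l : List String) : l.getLastD "" = l.getD (l.length - 1) "" := by
  rw [List.getLastD_eq_getLast?, List.getLast?_eq_getElem?, List.getD_eq_getElem?_getD]

theorem headD_append' (xs ys : List String) (h : xs ≠ []) :
    (xs ++ ys).headD "" = xs.headD "" := by
  cases xs with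
  | nil => exact absurd rfl h
  | cons x t => rfl

theorem getLastD_append' (xs ys : List String) (h : ys ≠ []) :
    (xs ++ ys).getLastD "" = ys.getLastD "" := by
  induction xs with
  | nil => rfl
  | cons x t ih =>
    rw [List.cons_append, List.getLastD_cons,
      getLastD_irrel (t ++ ys) (by simp [h]) x "", ih]

theorem revHeadD (l : List String) : l.reverse.headD "" = l.getLastD "" := by
  rw [List.headD_eq_head?, List.head?_reverse, List.getLastD_eq_getLast?]

theorem revLastD (l : List String) : l.reverse.getLastD "" = l.headD "" := by
  rw [List.getLastD_eq_getLast?, List.getLast?_reverse, List.headD_eq_head?]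

theorem getD_take (xs : List String) (m t : Nat) (h : t < m) :
    (xs.take m).getD t "" = xs.getD t "" := by
  simp [List.getD_eq_getElem?_getD, h]

theorem pyg (xs : List String) (k : Nat) :
    PySem.List.pyGetD xs (k : Int) "" = xs.getD k "" := by
  simpa using PySem.List.pyGetD_natCast xs k ""

theorem nl_eq (xs : List String) (d : List (String × List (String × Int))) (i j : Nat)
    (hij : i < j) (hj : j < xs.length) :
    nlVal xs d (i : Int) (j : Int) = tour_length (reverse_part_tour xs (i : Int) (j : Int)) d := by
  have h2 : 2 ≤ xs.length := by omega
  rw [rpt_eq xs i j hij hj, List.append_assoc]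
  by_cases hspec : i = 0 ∧ j = xs.length - 1
  · obtain ⟨hi0, hjn⟩ := hspec
    subst hi0
    have hd : xs.drop (j + 1) = [] := by rw [List.drop_eq_nil_iff]; omega
    have ht : (xs.drop 0).take (j - 0 + 1) = xs := by
      rw [List.drop_zero]
      apply List.take_of_length_le
      omega
    rw [hd, ht]
    simp only [List.take_zero, List.nil_append, List.append_nil]
    unfold nlVal
    rw [if_pos (by exact ⟨by omega, by omega⟩)]
    exact rArr_sum xs d h2
  · -- general case: decompose xs = P ++ M ++ S
    have hdd : xs.drop (j + 1) = (xs.drop i).drop (j - i + 1) := by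
      rw [List.drop_drop]; congr 1; omega
    have hPM : xs.take i ++ ((xs.drop i).take (j - i + 1) ++ xs.drop (j + 1)) = xs := by
      rw [hdd, List.take_append_drop, List.take_append_drop]
    have hMlen : ((xs.drop i).take (j - i + 1)).length = j - i + 1 := by
      rw [List.length_take, List.length_drop]; omega
    have hMne : (xs.drop i).take (j - i + 1) ≠ [] := by
      intro hh; rw [hh] at hMlen; simp at hMlen
    have hMrne : ((xs.drop i).take (j - i + 1)).reverse ≠ [] := by simp [hMne]
    have hMhead : ((xs.drop i).take (j - i + 1)).headD "" = xs.getD i "" := by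
      rw [headD_eq_getD, getD_take _ _ _ (by omega), getD_drop]
      norm_num
    have hMlast : ((xs.drop i).take (j - i + 1)).getLastD "" = xs.getD j "" := by
      rw [getLastD_eq_getD, hMlen]
      have he : j - i + 1 - 1 = j - i := by omega
      rw [he, getD_take _ _ _ (by omega), getD_drop]
      have : i + (j - i) = j := by omega
      rw [this]
    have hMrhead : (((xs.drop i).take (j - i + 1)).reverse).headD "" = xs.getD j "" := by
      rw [revHeadD, hMlast]
    have hMrlast : (((xs.drop i).take (j - i + 1)).reverse).getLastD "" = xs.getD i "" := by
      rw [revLastD, hMhead]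
    have hShead : j + 1 < xs.length → (xs.drop (j + 1)).headD "" = xs.getD (j + 1) "" := by
      intro _
      rw [headD_eq_getD, getD_drop]
    have hSne : j + 1 < xs.length → xs.drop (j + 1) ≠ [] := by
      intro hlt
      apply List.ne_nil_of_length_pos
      rw [List.length_drop]
      omega
    have hPne : 0 < i → xs.take i ≠ [] := by
      intro hlt
      apply List.ne_nil_of_length_pos
      rw [List.length_take]
      omega
    have hPlast : 0 < i → (xs.take i).getLastD "" = xs.getD (i - 1) "" := by
      intro hlt
      rw [getLastD_eq_getD, List.length_take]
      have he : min i xs.length - 1 = i - 1 := by omega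
      rw [he, getD_take _ _ _ (by omega)]
    -- B-side scalar components
    unfold nlVal
    rw [if_neg (by
      intro hc
      obtain ⟨hc1, hc2⟩ := hc
      apply hspec
      constructor <;> omega)]
    simp only [bDist_cdist]
    rw [wArr_seg xs d i j (by omega) hj, rArr_seg xs d i j (by omega) hj,
      wArr_sum xs d h2, tour_length_eq xs d h2]
    rw [wArr_get xs d j hj, pyg xs j, pyg xs i]
    -- decompose pLen of xs
    have hplen : ∀ g : String → String → Int, pLen g xs
        = pLen g (xs.take i ++ ((xs.drop i).take (j - i + 1) ++ xs.drop (j + 1))) := by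
      intro g; rw [hPM]
    by_cases hi0 : i = 0
    · -- i = 0, j < n - 1
      subst hi0
      have hjlt : j + 1 < xs.length := by omega
      have hmod : PySem.Int.mod ((0 : Nat) - 1) (xs.length : Int)
          = ((xs.length - 1 : Nat) : Int) := by
        rw [PySem.Int.mod_eq_emod_of_pos (by omega)]
        have e1 : ((0 : Nat) : Int) - 1 = ((xs.length : Int) - 1) - (xs.length : Int) := by
          push_cast; ring
        rw [e1, Int.sub_emod_right, Int.emod_eq_of_lt (by omega) (by omega)]
        omega
      rw [hmod, wArr_get xs d (xs.length - 1) (by omega), pyg xs (xs.length - 1)]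
      have hn0 : (xs.length - 1 + 1) % xs.length = 0 := by
        have : xs.length - 1 + 1 = xs.length := by omega
        rw [this, Nat.mod_self]
      rw [hn0]
      have hj1 : (j + 1) % xs.length = j + 1 := Nat.mod_eq_of_lt hjlt
      have hmodj : PySem.Int.mod ((j : Nat) + 1) (xs.length : Int) = ((j + 1 : Nat) : Int) := by
        have hc : ((j : Nat) : Int) + 1 = ((j + 1 : Nat) : Int) := by push_cast; ring
        rw [hc, PySem.Int.mod_natCast, hj1]
      rw [hmodj, pyg xs (j + 1), hj1]
      -- lists: P = [] here
      simp only [List.take_zero, List.nil_append, List.drop_zero, Nat.sub_zero] at hplen hPM hMlen hMne hMrne hMhead hMlast hMrhead hMrlast ⊢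
      rw [tour_length_eq _ d (by
        simp only [List.length_append, List.length_reverse, List.length_take,
          List.length_drop]
        omega)]
      rw [hplen (cdist d)]
      rw [pLen_append (cdist d) _ _ hMne (hSne hjlt),
        pLen_append (cdist d) _ _ hMrne (hSne hjlt)]
      rw [hMlast, hMrlast, hShead hjlt]
      -- closing terms of the new tour
      have hL0 : ((xs.take (j + 1)).reverse ++ xs.drop (j + 1)).getD 0 "" = xs.getD j "" := by
        rw [← headD_eq_getD, headD_append' _ _ hMrne, hMrhead]
      have hLl : ((xs.take (j + 1)).reverse ++ xs.drop (j + 1)).getD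
          (((xs.take (j + 1)).reverse ++ xs.drop (j + 1)).length - 1) "" = xs.getD (xs.length - 1) "" := by
        rw [← getLastD_eq_getD, getLastD_append' _ _ (hSne hjlt), getLastD_eq_getD,
          List.length_drop, getD_drop]
        congr 1
        omega
      have hjj : j - 0 + 1 = j + 1 := by omega
      rw [hjj] at *
      rw [hL0, hLl]
      ring
    · -- i > 0
      have hi1 : 0 < i := by omega
      have hmod : PySem.Int.mod ((i : Nat) - 1) (xs.length : Int)
          = ((i - 1 : Nat) : Int) := by
        have hc : ((i : Nat) : Int) - 1 = ((i - 1 : Nat) : Int) := by push_cast [hi1]; omega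
        rw [hc, PySem.Int.mod_natCast, Nat.mod_eq_of_lt (by omega)]
      rw [hmod, wArr_get xs d (i - 1) (by omega), pyg xs (i - 1)]
      have hii : (i - 1 + 1) % xs.length = i := by
        have : i - 1 + 1 = i := by omega
        rw [this, Nat.mod_eq_of_lt (by omega)]
      rw [hii]
      by_cases hjn : j = xs.length - 1
      · -- j = n - 1, i > 0 : S = []
        subst hjn
        have hd : xs.drop (xs.length - 1 + 1) = [] := by rw [List.drop_eq_nil_iff]; omega
        have hn0 : (xs.length - 1 + 1) % xs.length = 0 := by
          have : xs.length - 1 + 1 = xs.length := by omega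
          rw [this, Nat.mod_self]
        rw [hn0]
        have hmodj : PySem.Int.mod ((xs.length - 1 : Nat) + 1) (xs.length : Int)
            = ((0 : Nat) : Int) := by
          have hc : ((xs.length - 1 : Nat) : Int) + 1 = ((xs.length : Nat) : Int) := by
            push_cast [h2]; omega
          rw [hc, PySem.Int.mod_natCast, Nat.mod_self]
        rw [hmodj, pyg xs 0]
        simp only [hd, List.append_nil] at hplen hPM ⊢
        rw [tour_length_eq _ d (by
          simp only [List.length_append, List.length_reverse, List.length_take,
            List.length_drop]
          omega)]
        rw [hplen (cdist d)]
        rw [pLen_append (cdist d) _ _ (hPne hi1) hMne,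
          pLen_append (cdist d) _ _ (hPne hi1) hMrne]
        rw [hPlast hi1, hMhead, hMrhead]
        have hL0 : (xs.take i ++ ((xs.drop i).take (xs.length - 1 - i + 1)).reverse).getD 0 ""
            = xs.getD 0 "" := by
          rw [← headD_eq_getD, headD_append' _ _ (hPne hi1), headD_eq_getD,
            getD_take _ _ _ (by omega)]
        have hLl : (xs.take i ++ ((xs.drop i).take (xs.length - 1 - i + 1)).reverse).getD
            ((xs.take i ++ ((xs.drop i).take (xs.length - 1 - i + 1)).reverse).length - 1) ""
            = xs.getD i "" := by
          rw [← getLastD_eq_getD, getLastD_append' _ _ hMrne, hMrlast]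
        rw [hL0, hLl]
        ring
      · -- 0 < i, j < n - 1
        have hjlt : j + 1 < xs.length := by omega
        have hj1 : (j + 1) % xs.length = j + 1 := Nat.mod_eq_of_lt hjlt
        rw [hj1]
        have hmodj : PySem.Int.mod ((j : Nat) + 1) (xs.length : Int) = ((j + 1 : Nat) : Int) := by
          have hc : ((j : Nat) : Int) + 1 = ((j + 1 : Nat) : Int) := by push_cast; ring
          rw [hc, PySem.Int.mod_natCast, hj1]
        rw [hmodj, pyg xs (j + 1)]
        rw [tour_length_eq _ d (by
          simp only [List.length_append, List.length_reverse, List.length_take,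
            List.length_drop]
          omega)]
        rw [hplen (cdist d)]
        rw [pLen_append (cdist d) _ _ (hPne hi1) (by simp [hMne]),
          pLen_append (cdist d) _ _ hMne (hSne hjlt),
          pLen_append (cdist d) _ _ (hPne hi1) (by simp [hMrne]),
          pLen_append (cdist d) _ _ hMrne (hSne hjlt)]
        rw [hPlast hi1, headD_append' _ _ hMne, headD_append' _ _ hMrne, hMhead, hMrhead,
          hMlast, hMrlast, hShead hjlt]
        have hL0 : (xs.take i ++ (((xs.drop i).take (j - i + 1)).reverse ++ xs.drop (j + 1))).getD 0 ""
            = xs.getD 0 "" := by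
          rw [← headD_eq_getD, headD_append' _ _ (hPne hi1), headD_eq_getD,
            getD_take _ _ _ (by omega)]
        have hLl : (xs.take i ++ (((xs.drop i).take (j - i + 1)).reverse ++ xs.drop (j + 1))).getD
            ((xs.take i ++ (((xs.drop i).take (j - i + 1)).reverse ++ xs.drop (j + 1))).length - 1) ""
            = xs.getD (xs.length - 1) "" := by
          rw [← getLastD_eq_getD, getLastD_append' _ _ (by
              intro hh
              exact (hSne hjlt) (by
                rcases List.append_eq_nil_iff.mp hh with ⟨_, h⟩
                exact h)),
            getLastD_append' _ _ (hSne hjlt), getLastD_eq_getD, List.length_drop, getD_drop]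
          congr 1
          omega
        rw [hL0, hLl]
        ring

theorem any_congr' {α : Type} (l : List α) (f g : α → Bool)
    (h : ∀ x ∈ l, f x = g x) : l.any f = l.any g := by
  induction l with
  | nil => rfl
  | cons x t ih => simp only [List.any_cons]; rw [h x (by simp), ih (fun y hy => h y (by simp [hy]))]

theorem bScan_any (xs : List String) (d : List (String × List (String × Int))) (i : Int)
    (hi : 0 ≤ i) :
    ∀ (m : Nat) (a fwd bwd : Int), a = (xs.length : Int) - m → i + 1 ≤ a →
    fwd = ((PySem.List.pyRange i (a - 1) 1).map (fun k => PySem.List.pyGetD (wArr xs d) k 0)).sum →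
    bwd = ((PySem.List.pyRange i (a - 1) 1).map (fun k => PySem.List.pyGetD (rArr xs d) k 0)).sum →
    bScan xs d (wArr xs d) (rArr xs d) (wArr xs d).sum (rArr xs d).sum (xs.length : Int) i
        (PySem.List.pyRange a (xs.length : Int) 1) fwd bwd
      = (PySem.List.pyRange a (xs.length : Int) 1).any
          (fun j => decide (nlVal xs d i j < (wArr xs d).sum)) := by
  intro m
  induction m with
  | zero =>
    intro a fwd bwd ha hia hf hb
    rw [PySem.List.pyRange_one_eq_nil (by omega)]
    rfl
  | succ m' ih =>
    intro a fwd bwd ha hia hf hb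
    subst hf hb
    have hlt : a < (xs.length : Int) := by omega
    rw [PySem.List.pyRange_one_cons hlt]
    have hsum : ∀ v : List Int,
        ((PySem.List.pyRange i a 1).map (fun k => PySem.List.pyGetD v k 0)).sum
          = ((PySem.List.pyRange i (a - 1) 1).map (fun k => PySem.List.pyGetD v k 0)).sum
            + PySem.List.pyGetD v (a - 1) 0 := by
      intro v
      have h1 : PySem.List.pyRange i a 1
          = PySem.List.pyRange i (a - 1) 1 ++ [a - 1] := by
        rw [show a = (a - 1) + 1 by ring]
        rw [PySem.List.pyRange_one_succ_right (by omega)]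
        norm_num
      rw [h1]
      simp [List.map_append, List.sum_append]
    simp only [bScan, List.any_cons]
    have hexpr : (if i = 0 ∧ a = (xs.length : Int) - 1 then (rArr xs d).sum
        else (wArr xs d).sum
          - (PySem.List.pyGetD (wArr xs d) (PySem.Int.mod (i - 1) (xs.length : Int)) 0
              + (((PySem.List.pyRange i (a - 1) 1).map
                  (fun k => PySem.List.pyGetD (wArr xs d) k 0)).sum
                  + PySem.List.pyGetD (wArr xs d) (a - 1) 0)
              + PySem.List.pyGetD (wArr xs d) a 0)
          + bDist (PySem.List.pyGetD xs (PySem.Int.mod (i - 1) (xs.length : Int)) "")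
              (PySem.List.pyGetD xs a "") d
          + (((PySem.List.pyRange i (a - 1) 1).map
              (fun k => PySem.List.pyGetD (rArr xs d) k 0)).sum
              + PySem.List.pyGetD (rArr xs d) (a - 1) 0)
          + bDist (PySem.List.pyGetD xs i "")
              (PySem.List.pyGetD xs (PySem.Int.mod (a + 1) (xs.length : Int)) "") d)
      = nlVal xs d i a := by
      unfold nlVal
      by_cases hc : i = 0 ∧ a = (xs.length : Int) - 1
      · rw [if_pos hc, if_pos hc]
      · rw [if_neg hc, if_neg hc, hsum (wArr xs d), hsum (rArr xs d)]
    rw [hexpr]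
    have hfa : ∀ v : List Int,
        ((PySem.List.pyRange i (a - 1) 1).map (fun k => PySem.List.pyGetD v k 0)).sum
          + PySem.List.pyGetD v (a - 1) 0
        = ((PySem.List.pyRange i (a + 1 - 1) 1).map (fun k => PySem.List.pyGetD v k 0)).sum := by
      intro v
      rw [show a + 1 - 1 = a by ring]
      exact (hsum v).symm
    rw [hfa (wArr xs d), hfa (rArr xs d), ih (a + 1) _ _ (by omega) (by omega) rfl rfl]
    by_cases hc : nlVal xs d i a < (wArr xs d).sum
    · rw [if_pos hc]
      simp [hc]
    · rw [if_neg hc]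
      simp [hc]

-- ===== VERDICT (by name: the statement is the Claim_ definition above) =====
theorem better_inversion_spec : Claim_equal_better_inversion := by
  unfold Claim_equal_better_inversion
  intro tour d _ hpre
  unfold Pre_better_inversion at hpre
  unfold Spec_better_inversion
  show better_inversion tour d = better_inversion_alt tour d
  unfold better_inversion better_inversion_alt
  simp only []
  apply any_congr'
  intro i hi
  rw [PySem.List.mem_pyRange_one] at hi
  show ((PySem.List.pyRange (i + 1) (tour.length : Int) 1).any fun j =>
      decide (tour_length (reverse_part_tour tour i j) d < tour_length tour d))
    = bScan tour d (wArr tour d) (rArr tour d) (wArr tour d).sum (rArr tour d).sum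
        (tour.length : Int) i (PySem.List.pyRange (i + 1) (tour.length : Int) 1) 0 0
  have h0 : ∀ v : List Int, (0 : Int)
      = ((PySem.List.pyRange i (i + 1 - 1) 1).map (fun k => PySem.List.pyGetD v k 0)).sum := by
    intro v
    rw [show i + 1 - 1 = i by ring, PySem.List.pyRange_one_eq_nil (by omega)]
    rfl
  rw [bScan_any tour d i (by omega) ((tour.length : Int) - (i + 1)).toNat (i + 1) 0 0
    (by omega) (by omega) (h0 (wArr tour d)) (h0 (rArr tour d))]
  apply any_congr'
  intro j hj
  rw [PySem.List.mem_pyRange_one] at hj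
  have hi' : i = ((i.toNat : Nat) : Int) := by omega
  have hj' : j = ((j.toNat : Nat) : Int) := by omega
  rw [hi', hj', nl_eq tour d i.toNat j.toNat (by omega) (by omega), wArr_sum tour d hpre]
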